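-- pv_equiv track=rewrite | github.com/open-trace/data-team | ml/rag/chatbot/chat_memory.py | count_complete_pairs
-- ===== SOURCE A (Python) =====
-- def count_complete_pairs(messages: list[dict[str, str]]) -> int:
--     i = 0
--     n = 0
--     while i + 1 < len(messages):
--         if messages[i]["role"] == "user" and messages[i + 1]["role"] == "assistant":
--             n += 1
--             i += 2
--         else:
--             i += 1
--     return n
-- ===== SOURCE B (Python) =====
-- def count_complete_pairs(messages: list[dict[str, str]]) -> int:
--     return sum(
--         1
--         for a, b in zip(messages, messages[1:])
--         if a["role"] == "user" and b["role"] == "assistant"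
--     )
-- ===== Notes on version B (the rewrite author's own statement) =====
-- stated objective: simpler
-- what changed: Replaced the index-based while loop with conditional stepping (i += 2 on a match) by a single comprehension counting adjacent user->assistant positions, which is equal because a matched pair's second message has role 'assistant' and so can never start another match.
import Mathlib
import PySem

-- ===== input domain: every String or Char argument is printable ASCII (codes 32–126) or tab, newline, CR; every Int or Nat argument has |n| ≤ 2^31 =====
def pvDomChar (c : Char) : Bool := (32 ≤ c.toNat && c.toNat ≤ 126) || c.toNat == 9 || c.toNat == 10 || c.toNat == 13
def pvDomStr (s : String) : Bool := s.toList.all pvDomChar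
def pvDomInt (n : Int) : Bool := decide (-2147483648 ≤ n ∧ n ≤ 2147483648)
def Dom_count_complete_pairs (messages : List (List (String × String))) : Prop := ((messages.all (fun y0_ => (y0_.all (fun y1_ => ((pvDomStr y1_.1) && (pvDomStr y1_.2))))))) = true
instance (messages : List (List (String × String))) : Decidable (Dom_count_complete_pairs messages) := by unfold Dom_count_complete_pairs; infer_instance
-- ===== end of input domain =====

-- B replaces A's greedy while-loop with conditional stepping by a plain count over
-- adjacent user->assistant positions (simpler decomposition, same O(n) cost).


-- m["role"]: first-matching-key lookup on the association list (total form; under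
-- Pre_ the key is present, so this is exact Python dict lookup)
def pvRole (m : List (String × String)) : String :=
  ((m.find? (fun kv => kv.1 == "role")).map Prod.snd).getD ""

-- ===== PORT A =====
-- the while loop: i, n as in A; guard i+1 < len; conditional stepping
def pvLoopA (messages : List (List (String × String))) (i : Nat) (n : Int) : Int :=
  if i + 1 < messages.length then
    if pvRole (messages.getD i []) == "user" && pvRole (messages.getD (i+1) []) == "assistant" then
      pvLoopA messages (i+2) (n+1)
    else
      pvLoopA messages (i+1) n
  else n
termination_by messages.length - i

def count_complete_pairs (messages : List (List (String × String))) : Int :=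
  pvLoopA messages 0 0

-- ===== PORT B =====
def count_complete_pairs_alt (messages : List (List (String × String))) : Int :=
  ((messages.zip (messages.drop 1)).countP
    (fun ab => pvRole ab.1 == "user" && pvRole ab.2 == "assistant") : Nat)

-- ===== PRECONDITION & SPEC =====
-- Pre_ excludes exactly the inputs on which A raises KeyError: some non-last dict
-- lacks a "role" key (A reads every non-last dict), or the last dict lacks it while
-- the penultimate dict's role is "user" (the only case where the last dict is read).
def pvHasRole (m : List (String × String)) : Bool := m.any (fun kv => kv.1 == "role")
def Pre_count_complete_pairs (messages : List (List (String × String))) : Prop :=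
  (messages.dropLast.all pvHasRole &&
   (decide (messages.length < 2) ||
    !(pvRole (messages.getD (messages.length - 2) []) == "user") ||
    pvHasRole (messages.getD (messages.length - 1) []))) = true
instance (messages : List (List (String × String))) : Decidable (Pre_count_complete_pairs messages) := by unfold Pre_count_complete_pairs; infer_instance

def pvWitness_count_complete_pairs : (List (List (String × String))) :=
  [[("role", "user")], [("role", "assistant")]]

def Spec_count_complete_pairs (messages : List (List (String × String))) (out : Int) : Prop := out = count_complete_pairs_alt messages
instance (messages : List (List (String × String))) (out : Int) : Decidable (Spec_count_complete_pairs messages out) := by unfold Spec_count_complete_pairs; infer_instance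

-- ===== CLAIM (what is proved, stated in full; the proofs are below) =====
def Claim_equal_count_complete_pairs : Prop := ∀ (messages : List (List (String × String))), Dom_count_complete_pairs messages → Pre_count_complete_pairs messages → Spec_count_complete_pairs messages (count_complete_pairs messages)

-- ===== LEMMAS AND PROOFS =====

-- the adjacent-pair count B computes, as a function of a suffix
def pvAdj (l : List (List (String × String))) : Nat :=
  (l.zip (l.drop 1)).countP (fun ab => pvRole ab.1 == "user" && pvRole ab.2 == "assistant")

theorem pvAdj_nil : pvAdj [] = 0 := rfl
theorem pvAdj_single (a : List (String × String)) : pvAdj [a] = 0 := rfl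

theorem pvAdj_cons (a b : List (String × String)) (rest : List (List (String × String))) :
    pvAdj (a :: b :: rest) =
      (if pvRole a == "user" && pvRole b == "assistant" then 1 else 0) + pvAdj (b :: rest) := by
  simp [pvAdj, List.countP_cons]
  split_ifs <;> omega

-- key fact: if a's role is not "user", the head a contributes nothing
theorem pvAdj_cons_not_user (a : List (String × String)) (rest : List (List (String × String)))
    (h : pvRole a ≠ "user") : pvAdj (a :: rest) = pvAdj rest := by
  cases rest with
  | nil => rfl
  | cons b t =>
      rw [pvAdj_cons]
      simp [h]

-- the greedy loop computes n + adjacent-count of the remaining suffix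
theorem pvLoopA_eq (messages : List (List (String × String))) (i : Nat) (n : Int) :
    pvLoopA messages i n = n + (pvAdj (messages.drop i) : Int) := by
  rw [pvLoopA]
  split
  · rename_i hlt
    have hi : i < messages.length := by omega
    have hi1 : i + 1 < messages.length := hlt
    have hd : messages.drop i = messages[i] :: messages.drop (i+1) :=
      List.drop_eq_getElem_cons hi
    have hd1 : messages.drop (i+1) = messages[i+1] :: messages.drop (i+2) :=
      List.drop_eq_getElem_cons hi1
    have hg : messages.getD i [] = messages[i] := List.getD_eq_getElem _ _ hi
    have hg1 : messages.getD (i+1) [] = messages[i+1] := List.getD_eq_getElem _ _ hi1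
    split
    · rename_i hmatch
      rw [pvLoopA_eq messages (i+2) (n+1)]
      rw [hd, hd1, pvAdj_cons]
      have hb : pvRole messages[i+1] ≠ "user" := by
        rw [hg, hg1] at hmatch
        simp only [Bool.and_eq_true, beq_iff_eq] at hmatch
        rw [hmatch.2]; decide
      rw [pvAdj_cons_not_user _ _ hb]
      rw [hg, hg1] at hmatch
      simp [hmatch]
      omega
    · rename_i hmatch
      rw [pvLoopA_eq messages (i+1) n]
      rw [hd, hd1, pvAdj_cons]
      rw [hg, hg1] at hmatch
      simp only [Bool.not_eq_true] at hmatch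
      rw [hmatch]
      simp [← hd1]
  · rename_i hge
    have : messages.length ≤ i + 1 := by omega
    have : pvAdj (messages.drop i) = 0 := by
      rcases Nat.lt_or_ge i messages.length with h | h
      · have : messages.drop i = [messages[i]] := by
          rw [List.drop_eq_getElem_cons h]
          have : messages.drop (i+1) = [] := List.drop_eq_nil_of_le (by omega)
          rw [this]
        rw [this, pvAdj_single]
      · rw [List.drop_eq_nil_of_le h, pvAdj_nil]
    rw [this]
    simp
termination_by messages.length - i

-- ===== VERDICT (by name: the statement is the Claim_ definition above) =====
theorem count_complete_pairs_spec : Claim_equal_count_complete_pairs := by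
  intro messages _ _
  unfold Spec_count_complete_pairs count_complete_pairs count_complete_pairs_alt
  rw [pvLoopA_eq]
  simp [pvAdj]
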